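-- pv_equiv track=rewrite | github.com/jskim-research/PythonAlgorithm | programmers/level1/TrainingCloth.py | solution
-- ===== SOURCE A (Python) =====
-- def solution(n, lost, reserve):
--     answer = 0
--     lost = set(lost)
--     reserve = set(reserve)
--     lost_but_has_reserve = lost & reserve
--     reserve -= lost_but_has_reserve
--     lost -= lost_but_has_reserve
--     select = [-1, 1]
--
--     for i in range(n):
--         if (i + 1) in lost:
--             for s in select:
--                 if (i + s + 1) in reserve:
--                     lost.remove(i + 1)
--                     reserve.remove(i + s + 1)
--                     break
--
--     return n - len(lost)
-- ===== SOURCE B (Python) =====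
-- def solution(n, lost, reserve):
--     ls = set(lost) - set(reserve)
--     rs = set(reserve) - set(lost)
--     events = sorted([(x, False) for x in rs] +
--                     [(x, True) for x in ls if 1 <= x <= n],
--                     key=lambda t: t[0])
--     matched = 0
--     pending = None
--     for pos, is_lost in events:
--         if pending is not None and pos - pending[0] == 1 and is_lost != pending[1]:
--             matched += 1
--             pending = None
--         else:
--             pending = (pos, is_lost)
--     return n - len(ls) + matched
-- ===== Notes on version B (the rewrite author's own statement) =====
-- stated objective: alternative
-- what changed: B replaces A's per-student scan with set membership tests by a single merged sweep: it sorts the relevant lost and reserve numbers into one event list and matches value-adjacent lost/reserve pairs with an O(1) pending state, with no set lookups inside the loop.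
import Mathlib
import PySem

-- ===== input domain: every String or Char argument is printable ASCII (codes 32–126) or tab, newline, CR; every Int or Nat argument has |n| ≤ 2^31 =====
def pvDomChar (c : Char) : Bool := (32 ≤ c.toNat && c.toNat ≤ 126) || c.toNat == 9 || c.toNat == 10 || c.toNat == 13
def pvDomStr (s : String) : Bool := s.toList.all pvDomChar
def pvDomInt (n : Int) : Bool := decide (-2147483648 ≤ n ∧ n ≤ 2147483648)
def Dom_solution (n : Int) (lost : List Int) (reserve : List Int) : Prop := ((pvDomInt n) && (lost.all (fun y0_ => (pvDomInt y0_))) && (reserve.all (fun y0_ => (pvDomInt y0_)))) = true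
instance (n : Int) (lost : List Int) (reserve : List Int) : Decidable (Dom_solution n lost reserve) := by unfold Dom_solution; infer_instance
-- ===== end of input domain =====

-- B replaces A's per-student scan with membership tests in a reserve set by ONE merged sweep:
-- it sorts the relevant lost and reserve numbers together into a single event list and matches
-- value-adjacent lost/reserve pairs with an O(1) 'pending' state — no set lookups in the loop;
-- same return value everywhere (objective: alternative).

-- ===== PORT A =====
-- loop body of A's 'for i in range(n)'; the inner 'for s in select: … break' over the literal
-- list select = [-1, 1] is unrolled into the two guarded branches, in order s = -1 then s = 1;
-- 'lost.remove'/'reserve.remove' occur only under the membership test just made, where Python's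
-- set.remove equals Set.discard (no KeyError possible)
def stepA (p : PySem.Set Int × PySem.Set Int) (i : Int) : PySem.Set Int × PySem.Set Int :=
  if PySem.Set.contains p.1 (i + 1) then
    if PySem.Set.contains p.2 (i + -1 + 1) then
      (PySem.Set.discard p.1 (i + 1), PySem.Set.discard p.2 (i + -1 + 1))
    else if PySem.Set.contains p.2 (i + 1 + 1) then
      (PySem.Set.discard p.1 (i + 1), PySem.Set.discard p.2 (i + 1 + 1))
    else p
  else p

def solution (n : Int) (lost : List Int) (reserve : List Int) : Int :=
  let lostS : PySem.Set Int := PySem.Set.ofList lost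
  let reserveS : PySem.Set Int := PySem.Set.ofList reserve
  let lostButHasReserve : PySem.Set Int := PySem.Set.inter lostS reserveS
  let reserveS2 : PySem.Set Int := PySem.Set.diff reserveS lostButHasReserve
  let lostS2 : PySem.Set Int := PySem.Set.diff lostS lostButHasReserve
  let p := (PySem.List.pyRange 0 n).foldl stepA (lostS2, reserveS2)
  n - PySem.Set.len p.1

-- ===== PORT B =====
-- loop body of B's 'for pos, is_lost in events': state = (pending, matched)
def stepP (st : Option (Int × Bool) × Int) (e : Int × Bool) : Option (Int × Bool) × Int :=
  match st.1 with
  | some p => if e.1 - p.1 = 1 ∧ e.2 ≠ p.2 then (none, st.2 + 1) else (some e, st.2)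
  | none => (some e, st.2)

def solution_alt (n : Int) (lost : List Int) (reserve : List Int) : Int :=
  let ls : PySem.Set Int := PySem.Set.diff (PySem.Set.ofList lost) (PySem.Set.ofList reserve)
  let rs : PySem.Set Int := PySem.Set.diff (PySem.Set.ofList reserve) (PySem.Set.ofList lost)
  let events : List (Int × Bool) :=
    PySem.List.sorted
      (rs.map (fun x => (x, false)) ++
        (ls.filter (fun x => decide (1 ≤ x) && decide (x ≤ n))).map (fun x => (x, true)))
      (fun t => t.1)
  let p := events.foldl stepP (none, 0)
  n - PySem.Set.len ls + p.2

-- ===== PRECONDITION & SPEC =====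
def Spec_solution (n : Int) (lost : List Int) (reserve : List Int) (out : Int) : Prop := out = solution_alt n lost reserve
instance (n : Int) (lost : List Int) (reserve : List Int) (out : Int) : Decidable (Spec_solution n lost reserve out) := by unfold Spec_solution; infer_instance

-- ===== CLAIM (what is proved, stated in full; the proofs are below) =====
def Claim_equal_solution : Prop := ∀ (n : Int) (lost : List Int) (reserve : List Int), Dom_solution n lost reserve → Spec_solution n lost reserve (solution n lost reserve)

-- ===== LEMMAS AND PROOFS =====

-- the per-lost greedy (left neighbour, then right) that A's range loop amounts to;
-- used only as the middle form of the proof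
def stepB (n : Int) (p : PySem.Set Int × Int) (x : Int) : PySem.Set Int × Int :=
  if 1 ≤ x ∧ x ≤ n then
    if PySem.Set.contains p.1 (x - 1) then (PySem.Set.discard p.1 (x - 1), p.2 + 1)
    else if PySem.Set.contains p.1 (x + 1) then (PySem.Set.discard p.1 (x + 1), p.2 + 1)
    else p
  else p

-- the part of B's iteration list that is still ahead of A's loop counter lo
def bList (n lo : Int) (L : List Int) : List Int :=
  (PySem.List.sorted L (fun x => x)).filter (fun x => decide (lo < x) && decide (x ≤ n))

-- two strictly increasing lists with the same members are equal
lemma eq_of_mem_iff_pairwise_lt {s t : List Int}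
    (hs : s.Pairwise (· < ·)) (ht : t.Pairwise (· < ·))
    (h : ∀ x, x ∈ s ↔ x ∈ t) : s = t := by
  have hns : s.Nodup := hs.imp (fun h => ne_of_lt h)
  have hnt : t.Nodup := ht.imp (fun h => ne_of_lt h)
  exact List.Perm.eq_of_pairwise (fun a b _ _ hab hba => absurd hab (lt_asymm hba)) hs ht
    ((List.perm_ext_iff_of_nodup hns hnt).2 h)

lemma pairwise_lt_sorted {L : List Int} (hL : L.Nodup) :
    (PySem.List.sorted L (fun x => x)).Pairwise (· < ·) := by
  have h1 := PySem.List.sorted_pairwise L (fun x => x)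
  have h2 : (PySem.List.sorted L (fun x => x)).Nodup :=
    ((PySem.List.sorted_perm L (fun x => x) false).nodup_iff).2 hL
  exact (h1.and h2).imp (fun ⟨hle, hne⟩ => lt_of_le_of_ne hle hne)

lemma mem_bList {n lo : Int} {L : List Int} {x : Int} :
    x ∈ bList n lo L ↔ x ∈ L ∧ lo < x ∧ x ≤ n := by
  simp [bList, List.mem_filter, (PySem.List.sorted_perm L (fun x => x) false).mem_iff]

lemma pairwise_bList {n lo : Int} {L : List Int} (hL : L.Nodup) :
    (bList n lo L).Pairwise (· < ·) := by
  exact (pairwise_lt_sorted hL).filter _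

lemma bList_nil {n lo : Int} {L : List Int} (h : n ≤ lo) : bList n lo L = [] := by
  refine List.filter_eq_nil_iff.2 ?_
  intro x hx
  simp only [Bool.and_eq_true, decide_eq_true_eq, not_and]
  omega

lemma bList_not_mem {n lo : Int} {L : List Int} (hL : L.Nodup) (h : lo + 1 ∉ L) :
    bList n lo L = bList n (lo + 1) L := by
  refine eq_of_mem_iff_pairwise_lt (pairwise_bList hL) (pairwise_bList hL) ?_
  intro x
  simp only [mem_bList]
  constructor
  · rintro ⟨hxL, h1, h2⟩
    have hne : x ≠ lo + 1 := by rintro rfl; exact h hxL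
    exact ⟨hxL, by omega, h2⟩
  · rintro ⟨hxL, h1, h2⟩
    exact ⟨hxL, by omega, h2⟩

lemma bList_cons {n lo : Int} {L : List Int} (hL : L.Nodup) (h : lo + 1 ∈ L) (hn : lo + 1 ≤ n) :
    bList n lo L = (lo + 1) :: bList n (lo + 1) L := by
  refine eq_of_mem_iff_pairwise_lt (pairwise_bList hL) ?_ ?_
  · refine List.pairwise_cons.2 ⟨?_, pairwise_bList hL⟩
    intro y hy
    exact (mem_bList.1 hy).2.1
  · intro x
    simp only [mem_bList, List.mem_cons]
    constructor
    · rintro ⟨hxL, h1, h2⟩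
      by_cases hx : x = lo + 1
      · exact Or.inl hx
      · exact Or.inr ⟨hxL, by omega, h2⟩
    · rintro (rfl | ⟨hxL, h1, h2⟩)
      · exact ⟨h, by omega, hn⟩
      · exact ⟨hxL, by omega, h2⟩

lemma bList_discard {n lo : Int} {L : List Int} (hL : L.Nodup) :
    bList n (lo + 1) (PySem.Set.discard L (lo + 1)) = bList n (lo + 1) L := by
  refine eq_of_mem_iff_pairwise_lt (pairwise_bList (PySem.Set.nodup_discard _ _ hL))
    (pairwise_bList hL) ?_
  intro x
  simp only [mem_bList, PySem.Set.mem_discard]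
  constructor
  · rintro ⟨⟨hxL, _⟩, h1, h2⟩
    exact ⟨hxL, h1, h2⟩
  · rintro ⟨hxL, h1, h2⟩
    exact ⟨⟨hxL, by omega⟩, h1, h2⟩

lemma length_discard {L : List Int} {a : Int} (hL : L.Nodup) (h : a ∈ L) :
    ((PySem.Set.discard L a).length : Int) = (L.length : Int) - 1 := by
  have he : PySem.Set.discard L a = L.erase a := by
    rw [List.Nodup.erase_eq_filter hL]
    simp [PySem.Set.discard, bne]
  rw [he, List.length_erase_of_mem h]
  have : L.length ≠ 0 := by rintro h0; simp [List.length_eq_zero_iff.1 h0] at h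
  omega

-- A's range loop equals the per-lost greedy fold over bList
lemma main_lemma (n : Int) : ∀ (k : Nat) (lo : Int) (L R : List Int) (m : Int),
    n - lo ≤ (k : Int) → 0 ≤ lo → L.Nodup →
    ((PySem.List.pyRange lo n).foldl stepA (L, R)).2 = ((bList n lo L).foldl (stepB n) (R, m)).1
    ∧ (L.length : Int) - (((PySem.List.pyRange lo n).foldl stepA (L, R)).1.length : Int)
        = ((bList n lo L).foldl (stepB n) (R, m)).2 - m := by
  intro k
  induction k with
  | zero =>
    intro lo L R m hk hlo hL
    rw [PySem.List.pyRange_one_eq_nil (by omega), bList_nil (by omega)]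
    exact ⟨rfl, by simp⟩
  | succ k ih =>
    intro lo L R m hk hlo hL
    by_cases hlt : lo < n
    · rw [PySem.List.pyRange_one_cons hlt]
      simp only [List.foldl_cons]
      by_cases hmem : lo + 1 ∈ L
      · have hc : PySem.Set.contains L (lo + 1) = true := (PySem.Set.contains_iff _ _).2 hmem
        have eA : stepA (L, R) lo =
            (if PySem.Set.contains R lo then
              (PySem.Set.discard L (lo + 1), PySem.Set.discard R lo)
            else if PySem.Set.contains R (lo + 2) then
              (PySem.Set.discard L (lo + 1), PySem.Set.discard R (lo + 2))
            else (L, R)) := by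
          unfold stepA
          simp only [show lo + -1 + 1 = lo from by ring, show lo + 1 + 1 = lo + 2 from by ring]
          rw [if_pos hc]
        have eB : stepB n (R, m) (lo + 1) =
            (if PySem.Set.contains R lo then (PySem.Set.discard R lo, m + 1)
            else if PySem.Set.contains R (lo + 2) then (PySem.Set.discard R (lo + 2), m + 1)
            else (R, m)) := by
          unfold stepB
          simp only [show lo + 1 - 1 = lo from by ring, show lo + 1 + 1 = lo + 2 from by ring]
          rw [if_pos (by omega)]
        rw [bList_cons hL hmem (by omega)]
        simp only [List.foldl_cons]
        rw [eA, eB]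
        split_ifs with h1 h2
        · obtain ⟨ih1, ih2⟩ := ih (lo + 1) (PySem.Set.discard L (lo + 1))
            (PySem.Set.discard R lo) (m + 1) (by omega) (by omega)
            (PySem.Set.nodup_discard _ _ hL)
          rw [bList_discard hL] at ih1 ih2
          refine ⟨ih1, ?_⟩
          have hlen := length_discard hL hmem
          omega
        · obtain ⟨ih1, ih2⟩ := ih (lo + 1) (PySem.Set.discard L (lo + 1))
            (PySem.Set.discard R (lo + 2)) (m + 1) (by omega) (by omega)
            (PySem.Set.nodup_discard _ _ hL)
          rw [bList_discard hL] at ih1 ih2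
          refine ⟨ih1, ?_⟩
          have hlen := length_discard hL hmem
          omega
        · exact ih (lo + 1) L R m (by omega) (by omega) hL
      · have hc : ¬ PySem.Set.contains L (lo + 1) = true :=
          fun hc => hmem ((PySem.Set.contains_iff _ _).1 hc)
        have eA : stepA (L, R) lo = (L, R) := by
          unfold stepA
          rw [if_neg hc]
        rw [eA, bList_not_mem hL hmem]
        exact ih (lo + 1) L R m (by omega) (by omega) hL
    · rw [PySem.List.pyRange_one_eq_nil (by omega), bList_nil (by omega)]
      exact ⟨rfl, by simp⟩

lemma diff_inter_left (s t : List Int) :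
    PySem.Set.diff s (PySem.Set.inter s t) = PySem.Set.diff s t := by
  unfold PySem.Set.diff PySem.Set.inter
  refine List.filter_congr ?_
  intro x hx
  simp [List.mem_filter, hx]

lemma diff_inter_right (s t : List Int) :
    PySem.Set.diff t (PySem.Set.inter s t) = PySem.Set.diff t s := by
  unfold PySem.Set.diff PySem.Set.inter
  refine List.filter_congr ?_
  intro x hx
  simp [List.mem_filter, hx]

-- ---- the pending sweep, recursively, two events at a time ----
def scanPairs : List (Int × Bool) → Int
  | [] => 0
  | [_] => 0
  | a :: b :: rest =>
    if b.1 - a.1 = 1 ∧ b.2 ≠ a.2 then 1 + scanPairs rest else scanPairs (b :: rest)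
termination_by l => l.length

-- B's pending fold computes scanPairs
lemma pend_some : ∀ (k : Nat) (E : List (Int × Bool)), E.length ≤ k →
    ∀ (a : Int × Bool) (m : Int), (E.foldl stepP (some a, m)).2 = m + scanPairs (a :: E) := by
  intro k
  induction k with
  | zero =>
    intro E hE a m
    rw [List.length_eq_zero_iff.1 (Nat.le_zero.1 hE)]
    simp [scanPairs]
  | succ k ih =>
    intro E hE a m
    match E with
    | [] => simp [scanPairs]
    | b :: E' =>
      simp only [List.foldl_cons]
      by_cases hm : b.1 - a.1 = 1 ∧ b.2 ≠ a.2
      · have : stepP (some a, m) b = (none, m + 1) := if_pos hm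
        rw [this]
        match E' with
        | [] => simp [scanPairs, hm]
        | c :: E'' =>
          have : stepP (none, m + 1) c = (some c, m + 1) := by simp [stepP]
          simp only [List.foldl_cons, this]
          rw [ih E'' (by simp at hE ⊢; omega) c (m + 1)]
          simp only [scanPairs, if_pos hm]
          ring
      · have : stepP (some a, m) b = (some b, m) := if_neg hm
        rw [this, ih E' (by simp at hE ⊢; omega) b m]
        simp only [scanPairs, if_neg hm]

lemma pend_none (E : List (Int × Bool)) (m : Int) :
    (E.foldl stepP (none, m)).2 = m + scanPairs E := by
  match E with
  | [] => simp [scanPairs]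
  | a :: E' =>
    have : stepP (none, m) a = (some a, m) := by simp [stepP]
    simp only [List.foldl_cons, this]
    exact pend_some E'.length E' le_rfl a m

-- ---- restating stepB with propositional conditions ----
lemma contains_eq_decide (S : List Int) (a : Int) :
    PySem.Set.contains S a = decide (a ∈ S) := by
  by_cases h : a ∈ S
  · rw [(PySem.Set.contains_iff _ _).2 h, decide_eq_true h]
  · have hfalse : PySem.Set.contains S a = false := by
      cases hc : PySem.Set.contains S a
      · rfl
      · exact absurd ((PySem.Set.contains_iff _ _).1 hc) h
    rw [hfalse, decide_eq_false h]

lemma stepB_cases (n x : Int) (S : List Int) (m : Int) :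
    stepB n (S, m) x =
      if 1 ≤ x ∧ x ≤ n then
        if x - 1 ∈ S then (PySem.Set.discard S (x - 1), m + 1)
        else if x + 1 ∈ S then (PySem.Set.discard S (x + 1), m + 1)
        else (S, m)
      else (S, m) := by
  unfold stepB
  simp only [contains_eq_decide]
  split_ifs <;> simp_all

-- the matched counter starts anywhere
lemma foldl_stepB_shift (n : Int) : ∀ (L S : List Int) (m : Int),
    L.foldl (stepB n) (S, m) = ((L.foldl (stepB n) (S, 0)).1, m + (L.foldl (stepB n) (S, 0)).2) := by
  intro L
  induction L with
  | nil => intro S m; simp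
  | cons x L ih =>
    intro S m
    simp only [List.foldl_cons, stepB_cases]
    split_ifs with h1 h2 h3
    · rw [ih _ (m + 1), ih _ (0 + 1)]
      simp only [Prod.mk.injEq]
      exact ⟨trivial, by omega⟩
    · rw [ih _ (m + 1), ih _ (0 + 1)]
      simp only [Prod.mk.injEq]
      exact ⟨trivial, by omega⟩
    · exact ih S m
    · exact ih S m

-- the matched count only depends on the reserve set's members
lemma foldl_stepB_snd_memeq (n : Int) : ∀ (L S S' : List Int) (m : Int),
    (∀ x, x ∈ S ↔ x ∈ S') →
    (L.foldl (stepB n) (S, m)).2 = (L.foldl (stepB n) (S', m)).2 := by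
  intro L
  induction L with
  | nil => intro S S' m h; rfl
  | cons x L ih =>
    intro S S' m h
    simp only [List.foldl_cons, stepB_cases]
    simp only [h (x - 1), h (x + 1)]
    split_ifs
    · exact ih _ _ _ (fun y => by simp only [PySem.Set.mem_discard, h y])
    · exact ih _ _ _ (fun y => by simp only [PySem.Set.mem_discard, h y])
    · exact ih _ _ _ h
    · exact ih _ _ _ h

-- a reserve value no remaining lost value is adjacent to is never consumed
lemma foldl_stepB_skip (n r : Int) : ∀ (L S S' : List Int) (m : Int),
    (∀ x, x ∈ S ↔ (x ∈ S' ∨ x = r)) → (r + 1) ∉ L → (r - 1) ∉ L →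
    (L.foldl (stepB n) (S, m)).2 = (L.foldl (stepB n) (S', m)).2 := by
  intro L
  induction L with
  | nil => intro S S' m h h1 h2; rfl
  | cons x L ih =>
    intro S S' m h h1 h2
    have hx1 : x ≠ r + 1 := fun he => h1 (he ▸ List.mem_cons_self)
    have hx2 : x ≠ r - 1 := fun he => h2 (he ▸ List.mem_cons_self)
    have e1 : (x - 1 ∈ S) ↔ (x - 1 ∈ S') := by
      rw [h (x - 1)]
      constructor
      · rintro (hy | hy)
        · exact hy
        · exact absurd (show x = r + 1 by omega) hx1
      · exact Or.inl
    have e2 : (x + 1 ∈ S) ↔ (x + 1 ∈ S') := by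
      rw [h (x + 1)]
      constructor
      · rintro (hy | hy)
        · exact hy
        · exact absurd (show x = r - 1 by omega) hx2
      · exact Or.inl
    simp only [List.foldl_cons, stepB_cases]
    simp only [e1, e2]
    have h1' : r + 1 ∉ L := fun hm => h1 (List.mem_cons_of_mem _ hm)
    have h2' : r - 1 ∉ L := fun hm => h2 (List.mem_cons_of_mem _ hm)
    have hdisc : ∀ a : Int, a ≠ r →
        (∀ y, y ∈ PySem.Set.discard S a ↔ (y ∈ PySem.Set.discard S' a ∨ y = r)) := by
      intro a ha y
      simp only [PySem.Set.mem_discard, h y]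
      constructor
      · rintro ⟨hy | hy, hne⟩
        · exact Or.inl ⟨hy, hne⟩
        · exact Or.inr hy
      · rintro (⟨hy, hne⟩ | hy)
        · exact ⟨Or.inl hy, hne⟩
        · exact ⟨Or.inr hy, by omega⟩
    split_ifs with hg hc hc
    · exact ih _ _ _ (hdisc (x - 1) (by omega)) h1' h2'
    · exact ih _ _ _ (hdisc (x + 1) (by omega)) h1' h2'
    · exact ih _ _ _ h h1' h2'
    · exact ih _ _ _ h h1' h2'

-- ---- lost and reserve values of an event list ----
def evLost (E : List (Int × Bool)) : List Int := (E.filter (fun p => p.2)).map (fun p => p.1)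
def evRes (E : List (Int × Bool)) : List Int := (E.filter (fun p => !p.2)).map (fun p => p.1)

lemma evLost_cons_true (x : Int) (E : List (Int × Bool)) : evLost ((x, true) :: E) = x :: evLost E := by
  simp [evLost]
lemma evLost_cons_false (x : Int) (E : List (Int × Bool)) : evLost ((x, false) :: E) = evLost E := by
  simp [evLost]
lemma evRes_cons_true (x : Int) (E : List (Int × Bool)) : evRes ((x, true) :: E) = evRes E := by
  simp [evRes]
lemma evRes_cons_false (x : Int) (E : List (Int × Bool)) : evRes ((x, false) :: E) = x :: evRes E := by
  simp [evRes]

lemma mem_evLost {E : List (Int × Bool)} {z : Int} : z ∈ evLost E ↔ (z, true) ∈ E := by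
  simp only [evLost, List.mem_map, List.mem_filter]
  constructor
  · rintro ⟨⟨y, b⟩, ⟨hm, hb⟩, rfl⟩
    simp only at hb; subst hb; exact hm
  · intro hm; exact ⟨(z, true), ⟨hm, rfl⟩, rfl⟩

lemma mem_evRes {E : List (Int × Bool)} {z : Int} : z ∈ evRes E ↔ (z, false) ∈ E := by
  simp only [evRes, List.mem_map, List.mem_filter]
  constructor
  · rintro ⟨⟨y, b⟩, ⟨hm, hb⟩, rfl⟩
    simp only [Bool.not_eq_true'] at hb; subst hb; exact hm
  · intro hm; exact ⟨(z, false), ⟨hm, by simp⟩, rfl⟩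

-- ---- the heart: the merged sweep equals the per-lost greedy ----
lemma scan_gr (n : Int) : ∀ (k : Nat) (E : List (Int × Bool)), E.length ≤ k →
    E.Pairwise (fun a b => a.1 < b.1) →
    (∀ p ∈ E, p.2 = true → 1 ≤ p.1 ∧ p.1 ≤ n) →
    scanPairs E = ((evLost E).foldl (stepB n) (evRes E, 0)).2 := by
  intro k
  induction k with
  | zero =>
    intro E hE _ _
    rw [List.length_eq_zero_iff.1 (Nat.le_zero.1 hE)]
    simp [scanPairs, evLost, evRes]
  | succ k ih =>
    intro E hE hp hrange
    match E with
    | [] => simp [scanPairs, evLost, evRes]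
    | [(x, b)] =>
      cases b
      · simp [scanPairs, evLost, evRes]
      · have hg : 1 ≤ x ∧ x ≤ n := hrange (x, true) List.mem_cons_self rfl
        simp only [scanPairs, evLost_cons_true, evRes_cons_true]
        simp only [evLost, evRes, List.filter_nil, List.map_nil, List.foldl_cons,
          List.foldl_nil, stepB_cases]
        rw [if_pos hg, if_neg (by simp), if_neg (by simp)]
    | (x, xb) :: (y, yb) :: rest =>
      have hxy : x < y := (List.pairwise_cons.1 hp).1 (y, yb) List.mem_cons_self
      have hrest : ∀ p ∈ rest, y < p.1 :=
        fun p hm => (List.pairwise_cons.1 (List.pairwise_cons.1 hp).2).1 p hm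
      have hrestx : ∀ p ∈ rest, x < p.1 :=
        fun p hm => (List.pairwise_cons.1 hp).1 p (List.mem_cons_of_mem _ hm)
      have hp' : ((y, yb) :: rest).Pairwise (fun a b => a.1 < b.1) := (List.pairwise_cons.1 hp).2
      have hpr : rest.Pairwise (fun a b => a.1 < b.1) := (List.pairwise_cons.1 hp').2
      have hrange' : ∀ p ∈ (y, yb) :: rest, p.2 = true → 1 ≤ p.1 ∧ p.1 ≤ n :=
        fun p hm => hrange p (List.mem_cons_of_mem _ hm)
      have hranger : ∀ p ∈ rest, p.2 = true → 1 ≤ p.1 ∧ p.1 ≤ n :=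
        fun p hm => hrange' p (List.mem_cons_of_mem _ hm)
      have hlen : ((y, yb) :: rest).length ≤ k := by simp at hE ⊢; omega
      have hlenr : rest.length ≤ k := by simp at hE ⊢; omega
      cases xb
      · -- head is a reserve x
        by_cases hm : y - x = 1 ∧ yb ≠ false
        · -- match: y = x + 1 is a lost, consumes reserve x
          obtain ⟨hy1, hy2⟩ := hm
          have hyb : yb = true := Bool.ne_false_iff.mp hy2
          subst hyb
          have hyg : 1 ≤ y ∧ y ≤ n :=
            hrange (y, true) (List.mem_cons_of_mem _ List.mem_cons_self) rfl
          have hsp : scanPairs ((x, false) :: (y, true) :: rest) = 1 + scanPairs rest := by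
            simp [scanPairs, hy1]
          rw [hsp, evLost_cons_false, evLost_cons_true, evRes_cons_false, evRes_cons_true]
          simp only [List.foldl_cons, stepB_cases]
          rw [if_pos hyg, if_pos (show y - 1 ∈ x :: evRes rest by
            simp only [List.mem_cons]; left; omega)]
          have hnot : y - 1 ∉ evRes rest := by
            intro hmem
            have := hrest _ (mem_evRes.1 hmem); simp at this; omega
          have hdm : ∀ z, z ∈ PySem.Set.discard (x :: evRes rest) (y - 1) ↔ z ∈ evRes rest := by
            intro z
            simp only [PySem.Set.mem_discard, List.mem_cons]
            constructor
            · rintro ⟨hz | hz, hne⟩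
              · omega
              · exact hz
            · intro hz
              refine ⟨Or.inr hz, ?_⟩
              intro he; subst he; exact hnot hz
          rw [foldl_stepB_shift, foldl_stepB_snd_memeq n _ _ (evRes rest) 0 hdm,
            ← ih rest hlenr hpr hranger]
          omega
        · -- no match at (x,·): skip the reserve x
          have hsp : scanPairs ((x, false) :: (y, yb) :: rest) = scanPairs ((y, yb) :: rest) := by
            simp only [scanPairs]
            rw [if_neg (by intro ⟨h1, h2⟩; exact hm ⟨h1, by simpa using h2⟩)]
          rw [hsp, evLost_cons_false, evRes_cons_false]
          have hnl1 : x + 1 ∉ evLost ((y, yb) :: rest) := by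
            intro hmem
            rcases List.mem_cons.1 (mem_evLost.1 hmem) with h | h
            · have ha : x + 1 = y := by simpa using congrArg Prod.fst h
              have hb : yb = true := by simpa using (congrArg Prod.snd h).symm
              exact hm ⟨by omega, by simp [hb]⟩
            · have := hrest _ h; simp at this; omega
          have hnl2 : x - 1 ∉ evLost ((y, yb) :: rest) := by
            intro hmem
            rcases List.mem_cons.1 (mem_evLost.1 hmem) with h | h
            · have ha : x - 1 = y := by simpa using congrArg Prod.fst h
              omega
            · have := hrest _ h; simp at this; omega
          rw [foldl_stepB_skip n x _ _ (evRes ((y, yb) :: rest)) 0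
            (fun z => by simp only [List.mem_cons]; tauto) hnl1 hnl2]
          exact ih _ hlen hp' hrange'
      · -- head is a lost x
        have hxg : 1 ≤ x ∧ x ≤ n := hrange (x, true) List.mem_cons_self rfl
        have hnres1 : x - 1 ∉ evRes ((y, yb) :: rest) := by
          intro hmem
          rcases List.mem_cons.1 (mem_evRes.1 hmem) with h | h
          · have ha : x - 1 = y := by simpa using congrArg Prod.fst h
            omega
          · have := hrestx _ h; simp at this; omega
        by_cases hm : y - x = 1 ∧ yb = false
        · -- match: reserve y = x + 1 consumed by lost x
          obtain ⟨hy1, hy2⟩ := hm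
          subst hy2
          have hsp : scanPairs ((x, true) :: (y, false) :: rest) = 1 + scanPairs rest := by
            simp [scanPairs, hy1]
          rw [hsp, evLost_cons_true, evLost_cons_false, evRes_cons_true, evRes_cons_false]
          simp only [List.foldl_cons, stepB_cases]
          rw [if_pos hxg, if_neg (show x - 1 ∉ y :: evRes rest by
              intro hmem
              rcases List.mem_cons.1 hmem with h | hmem
              · omega
              · have := hrest _ (mem_evRes.1 hmem); simp at this; omega),
            if_pos (show x + 1 ∈ y :: evRes rest by simp only [List.mem_cons]; left; omega)]
          have hnot : x + 1 ∉ evRes rest := by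
            intro hmem
            have := hrest _ (mem_evRes.1 hmem); simp at this; omega
          have hdm : ∀ z, z ∈ PySem.Set.discard (y :: evRes rest) (x + 1) ↔ z ∈ evRes rest := by
            intro z
            simp only [PySem.Set.mem_discard, List.mem_cons]
            constructor
            · rintro ⟨hz | hz, hne⟩
              · omega
              · exact hz
            · intro hz
              refine ⟨Or.inr hz, ?_⟩
              intro he; subst he; exact hnot hz
          rw [foldl_stepB_shift, foldl_stepB_snd_memeq n _ _ (evRes rest) 0 hdm,
            ← ih rest hlenr hpr hranger]
          omega
        · -- no match at (x,·): the lost x stays unmatched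
          have hnres2 : x + 1 ∉ evRes ((y, yb) :: rest) := by
            intro hmem
            rcases List.mem_cons.1 (mem_evRes.1 hmem) with h | h
            · have ha : x + 1 = y := by simpa using congrArg Prod.fst h
              have hb : yb = false := by simpa using (congrArg Prod.snd h).symm
              exact hm ⟨by omega, hb⟩
            · have := hrest _ h; simp at this; omega
          have hsp : scanPairs ((x, true) :: (y, yb) :: rest) = scanPairs ((y, yb) :: rest) := by
            simp only [scanPairs]
            rw [if_neg (by
              intro ⟨h1, h2⟩
              cases yb
              · exact hm ⟨h1, rfl⟩
              · exact h2 rfl)]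
          rw [hsp, evLost_cons_true, evRes_cons_true]
          simp only [List.foldl_cons, stepB_cases]
          rw [if_pos hxg, if_neg hnres1, if_neg hnres2]
          exact ih _ hlen hp' hrange'

-- ===== VERDICT (by name: the statement is the Claim_ definition above) =====
theorem solution_spec : Claim_equal_solution := by
  intro n lost reserve _
  unfold Spec_solution solution solution_alt
  simp only [diff_inter_left, diff_inter_right]
  set ls := PySem.Set.diff (PySem.Set.ofList lost) (PySem.Set.ofList reserve) with hls
  set rs := PySem.Set.diff (PySem.Set.ofList reserve) (PySem.Set.ofList lost) with hrs
  have hlsN : ls.Nodup := PySem.Set.nodup_diff _ _ (PySem.Set.nodup_ofList lost)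
  have hrsN : rs.Nodup := PySem.Set.nodup_diff _ _ (PySem.Set.nodup_ofList reserve)
  have hdisj : ∀ x : Int, x ∈ ls → x ∉ rs := by
    intro x hx hr
    rw [hls, PySem.Set.mem_diff] at hx
    rw [hrs, PySem.Set.mem_diff] at hr
    exact hx.2 (by simpa [PySem.Set.mem_ofList] using hr.1)
  set lsF := ls.filter (fun x => decide (1 ≤ x) && decide (x ≤ n)) with hlsF
  set E := PySem.List.sorted
      (rs.map (fun x => (x, false)) ++ lsF.map (fun x => (x, true))) (fun t : Int × Bool => t.1)
    with hE
  -- E is strictly increasing in the value component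
  have hmemE : ∀ p : Int × Bool, p ∈ E ↔
      (p.2 = false ∧ p.1 ∈ rs) ∨ (p.2 = true ∧ p.1 ∈ lsF) := by
    intro ⟨z, b⟩
    rw [hE, (PySem.List.sorted_perm _ _ false).mem_iff]
    simp only [List.mem_append, List.mem_map, Prod.mk.injEq]
    constructor
    · rintro (⟨w, hw, rfl, rfl⟩ | ⟨w, hw, rfl, rfl⟩)
      · exact Or.inl ⟨rfl, hw⟩
      · exact Or.inr ⟨rfl, hw⟩
    · rintro (⟨rfl, hw⟩ | ⟨rfl, hw⟩)
      · exact Or.inl ⟨z, hw, rfl, rfl⟩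
      · exact Or.inr ⟨z, hw, rfl, rfl⟩
  have hEp : E.Pairwise (fun a b : Int × Bool => a.1 < b.1) := by
    have hle : E.Pairwise (fun a b : Int × Bool => a.1 ≤ b.1) :=
      PySem.List.sorted_pairwise _ _
    have hnodup : (E.map Prod.fst).Nodup := by
      have hperm : (E.map Prod.fst).Perm
          ((rs.map (fun x => (x, false)) ++ lsF.map (fun x => (x, true))).map Prod.fst) :=
        (PySem.List.sorted_perm _ _ false).map _
      rw [hperm.nodup_iff]
      simp only [List.map_append, List.map_map]
      have : ∀ (b : Bool) (L : List Int), L.map (Prod.fst ∘ fun x => (x, b)) = L := by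
        intro b L; simp [Function.comp_def]
      rw [this, this]
      refine List.Nodup.append hrsN (hlsF ▸ hlsN.filter _) ?_
      intro x hx hfx
      exact hdisj x (List.mem_of_mem_filter hfx) hx
    have hne : E.Pairwise (fun a b : Int × Bool => a.1 ≠ b.1) :=
      (List.pairwise_map.1 hnodup)
    exact (hle.and hne).imp (fun ⟨h1, h2⟩ => lt_of_le_of_ne h1 h2)
  have hrange : ∀ p ∈ E, p.2 = true → 1 ≤ p.1 ∧ p.1 ≤ n := by
    intro p hm ht
    rcases (hmemE p).1 hm with ⟨hf, _⟩ | ⟨_, hmem⟩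
    · rw [ht] at hf; exact absurd hf (by simp)
    · rw [hlsF, List.mem_filter] at hmem
      have := hmem.2; simp at this; omega
  -- the lost values of E are exactly bList n 0 ls
  have hevL : evLost E = bList n 0 ls := by
    refine eq_of_mem_iff_pairwise_lt ?_ (pairwise_bList hlsN) ?_
    · have := hEp.filter (fun p : Int × Bool => p.2)
      exact List.pairwise_map.2 this
    · intro z
      rw [mem_evLost, hmemE (z, true), mem_bList]
      simp only [hlsF, List.mem_filter]
      constructor
      · rintro (⟨h, _⟩ | ⟨_, hz, hb⟩)
        · exact absurd h (by simp)
        · simp at hb; exact ⟨hz, by omega⟩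
      · rintro ⟨hz, h1, h2⟩
        exact Or.inr ⟨by trivial, hz, by simp; omega⟩
  -- the reserve values of E are exactly the members of rs
  have hevR : ∀ z : Int, z ∈ evRes E ↔ z ∈ rs := by
    intro z
    rw [mem_evRes, hmemE (z, false)]
    constructor
    · rintro (⟨_, hz⟩ | ⟨h, _⟩)
      · exact hz
      · exact absurd h (by simp)
    · intro hz; exact Or.inl ⟨rfl, hz⟩
  -- chain the three equalities together
  have h1 := (main_lemma n n.toNat 0 ls rs 0 (by omega) le_rfl hlsN).2
  have h2 : ((bList n 0 ls).foldl (stepB n) (rs, 0)).2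
      = ((evLost E).foldl (stepB n) (evRes E, 0)).2 := by
    rw [hevL]
    exact foldl_stepB_snd_memeq n (bList n 0 ls) rs (evRes E) 0 (fun z => (hevR z).symm)
  have h3 := scan_gr n E.length E le_rfl hEp hrange
  have h4 := pend_none E 0
  simp only [PySem.Set.len] at *
  omega
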